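-- pv_equiv track=rewrite | github.com/PrakharDoneria/Artifix | core/agent_modes.py | _formalize_response
-- ===== SOURCE A (Python) =====
-- def _formalize_response(response: str) -> str:
--     """Make response more formal"""
--     # Simple formalization logic
--     formal_phrases = {
--         "yeah": "yes",
--         "ok": "very well",
--         "sure": "certainly",
--         "nope": "no",
--         "gonna": "going to",
--         "wanna": "want to"
--     }
--
--     for informal, formal in formal_phrases.items():
--         response = response.replace(informal, formal)
--
--     return response
-- ===== SOURCE B (Python) =====
-- PAIRS = [("yeah", "yes"), ("ok", "very well"), ("sure", "certainly"),
--          ("nope", "no"), ("gonna", "going to"), ("wanna", "want to")]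
--
--
-- def _formalize_response(response: str) -> str:
--     """Make response more formal: one left-to-right scan replacing each
--     informal word by its formal equivalent where it occurs."""
--     parts = []
--     i = 0
--     n = len(response)
--     while i < n:
--         for informal, formal in PAIRS:
--             if response.startswith(informal, i):
--                 parts.append(formal)
--                 i += len(informal)
--                 break
--         else:
--             parts.append(response[i])
--             i += 1
--     return "".join(parts)
-- ===== Notes on version B (the rewrite author's own statement) =====
-- stated objective: alternative
-- what changed: A makes six sequential full-string replace passes (one per informal word); B makes a single left-to-right scan over the input, testing the six words at each position and emitting the formal equivalent or the current character, so replacements never see each other's output.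
-- intended difference: On inputs containing the substring 'yeahure', A's sequential passes cascade: replacing 'yeah'->'yes' leaves an 's' that joins the following 'ure' into a new 'sure' which A's later pass also replaces (A('yeahure')='yecertainly'); B replaces only words present in the input (B('yeahure')='yesure'), which is the intended word-substitution behaviour. — e.g. on _formalize_response("yeahure"): A returns "yecertainly", B returns "yesure"
import Mathlib
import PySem

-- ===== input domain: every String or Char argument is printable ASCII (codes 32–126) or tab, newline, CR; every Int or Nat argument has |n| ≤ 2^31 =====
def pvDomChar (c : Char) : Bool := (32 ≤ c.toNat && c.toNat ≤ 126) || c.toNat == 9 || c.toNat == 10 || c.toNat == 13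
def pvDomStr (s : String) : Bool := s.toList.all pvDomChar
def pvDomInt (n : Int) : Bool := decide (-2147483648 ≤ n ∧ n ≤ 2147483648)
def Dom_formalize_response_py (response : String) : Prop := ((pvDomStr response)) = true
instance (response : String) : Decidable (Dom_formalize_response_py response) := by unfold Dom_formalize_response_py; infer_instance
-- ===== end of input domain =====

-- B replaces the six informal words in ONE left-to-right scan instead of A's six sequential
-- full-string replace passes; on inputs containing "yeahure" A's passes cascade (see D_ below) and B returns the intended value.


-- ===== PORT A =====
def formalize_response_py (response : String) : String :=
  let r1 := PySem.Str.replace response "yeah" "yes"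
  let r2 := PySem.Str.replace r1 "ok" "very well"
  let r3 := PySem.Str.replace r2 "sure" "certainly"
  let r4 := PySem.Str.replace r3 "nope" "no"
  let r5 := PySem.Str.replace r4 "gonna" "going to"
  let r6 := PySem.Str.replace r5 "wanna" "want to"
  r6

-- ===== PORT B =====
-- the PAIRS table of Source B
def pvPairs : List (List Char × List Char) :=
  [("yeah".toList, "yes".toList), ("ok".toList, "very well".toList),
   ("sure".toList, "certainly".toList), ("nope".toList, "no".toList),
   ("gonna".toList, "going to".toList), ("wanna".toList, "want to".toList)]

-- the inner `for informal, formal in PAIRS: if response.startswith(informal, i): ... break / else` loop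
def pvScan : List (List Char × List Char) → List Char → Option (List Char × List Char)
  | [], _ => none
  | (inf, frm) :: rest, cs => if inf.isPrefixOf cs then some (inf, frm) else pvScan rest cs

-- every informal word in the table is nonempty (cited by altGo's termination proof)
lemma pvScan_pos : ∀ (ps : List (List Char × List Char)), (∀ p ∈ ps, p.1 ≠ []) →
    ∀ (cs : List Char) (pr : List Char × List Char), pvScan ps cs = some pr → 0 < pr.1.length := by
  intro ps
  induction ps with
  | nil => intro _ cs pr h; simp [pvScan] at h
  | cons a rest ih =>
    intro hps cs pr h
    obtain ⟨inf, frm⟩ := a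
    rw [pvScan] at h
    split at h
    · cases h
      have : inf ≠ [] := hps (inf, frm) (by simp)
      simpa [List.length_pos_iff] using this
    · exact ih (fun p hp => hps p (by simp [hp])) cs pr h

-- the outer while-loop of Source B: one left-to-right scan emitting replacements
def altGo (cs : List Char) : List Char :=
  match cs with
  | [] => []
  | c :: t =>
    match h : pvScan pvPairs (c :: t) with
    | some pr => pr.2 ++ altGo ((c :: t).drop pr.1.length)
    | none => c :: altGo t
termination_by cs.length
decreasing_by
  · have hp := pvScan_pos pvPairs (by decide) _ _ h
    simp only [List.length_drop, List.length_cons]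
    omega
  · simp

def formalize_response_py_alt (response : String) : String :=
  String.ofList (altGo response.toList)

-- ===== PRECONDITION & SPEC =====
-- On inputs containing the substring 'yeahure', A's sequential passes cascade: replacing 'yeah'->'yes'
-- leaves an 's' that joins the following 'ure' into a new 'sure' which A's later pass also replaces
-- (A('yeahure') = 'yecertainly'); B replaces only words present in the input (B('yeahure') = 'yesure'),
-- which is the intended word-substitution behaviour.
def D_formalize_response_py (response : String) : Prop :=
  PySem.Str.isIn "yeahure" response = true
instance (response : String) : Decidable (D_formalize_response_py response) := by
  unfold D_formalize_response_py; infer_instance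

def Spec_formalize_response_py (response : String) (out : String) : Prop :=
  ¬ D_formalize_response_py response → out = formalize_response_py_alt response
instance (response : String) (out : String) : Decidable (Spec_formalize_response_py response out) := by
  unfold Spec_formalize_response_py; infer_instance

def pvDiffWitness_formalize_response_py : String := "yeahure"
def pvDiffWitnessOut_formalize_response_py : String × String := ("yecertainly", "yesure")

-- ===== CLAIM (what is proved, stated in full; the proofs are below) =====
def Claim_unchanged_formalize_response_py : Prop := ∀ (response : String), Dom_formalize_response_py response → Spec_formalize_response_py response (formalize_response_py response)
def Claim_changed_formalize_response_py : Prop := Dom_formalize_response_py (pvDiffWitness_formalize_response_py) ∧ D_formalize_response_py (pvDiffWitness_formalize_response_py) ∧ formalize_response_py (pvDiffWitness_formalize_response_py) = pvDiffWitnessOut_formalize_response_py.1 ∧ formalize_response_py_alt (pvDiffWitness_formalize_response_py) = pvDiffWitnessOut_formalize_response_py.2 ∧ pvDiffWitnessOut_formalize_response_py.1 ≠ pvDiffWitnessOut_formalize_response_py.2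

def Claim_exact_formalize_response_py : Prop := ∀ (response : String), Dom_formalize_response_py response → D_formalize_response_py response → formalize_response_py response ≠ formalize_response_py_alt response

-- ===== LEMMAS AND PROOFS =====

-- str.replace for a nonempty pattern, as a structural recursion (proof-side mirror of PySem.Chars.replace)
def rep (o : Char) (old' new : List Char) : List Char → List Char
  | [] => []
  | c :: t =>
    if (o :: old').isPrefixOf (c :: t) then new ++ rep o old' new (t.drop old'.length)
    else c :: rep o old' new t
termination_by s => s.length
decreasing_by
  · simp only [List.length_drop, List.length_cons]; omega
  · simp

lemma go_eq_rep (o : Char) (old' new : List Char) :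
    ∀ (fuel : Nat) (s acc : List Char), s.length ≤ fuel →
      PySem.Chars.replace.go (o :: old') new fuel s acc = acc.reverse ++ rep o old' new s := by
  intro fuel
  induction fuel with
  | zero =>
    intro s acc h
    have hs : s = [] := by cases s <;> simp_all
    subst hs
    simp [PySem.Chars.replace.go, rep]
  | succ n ih =>
    intro s acc h
    cases s with
    | nil => simp [PySem.Chars.replace.go, rep]
    | cons c t =>
      rw [PySem.Chars.replace.go, rep]
      by_cases hp : (o :: old').isPrefixOf (c :: t)
      · simp only [hp, if_true]
        rw [ih]
        · simp
        · simp only [List.length_cons, List.length_drop] at h ⊢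
          omega
      · simp only [hp, Bool.false_eq_true, if_false]
        rw [ih]
        · simp
        · simp at h; omega

lemma replace_eq_rep (o : Char) (old' new s : List Char) :
    PySem.Chars.replace s (o :: old') new = rep o old' new s := by
  rw [PySem.Chars.replace]
  simp [go_eq_rep o old' new s.length s [] le_rfl]

def pvCompat (a b : List Char) : Bool := a.isPrefixOf b || b.isPrefixOf a

lemma not_prefix_of_not_compat {k p : List Char} (h : pvCompat p k = false) :
    ∀ z, ¬ k <+: (p ++ z) := by
  intro z hk
  simp only [pvCompat, Bool.or_eq_false_iff] at h
  rcases List.prefix_or_prefix_of_prefix hk (List.prefix_append p z) with h1 | h1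
  · rw [← List.isPrefixOf_iff_prefix] at h1; simp [h1] at h
  · rw [← List.isPrefixOf_iff_prefix] at h1; simp [h1] at h

lemma rep_consume (o : Char) (old' new t : List Char) :
    rep o old' new ((o :: old') ++ t) = new ++ rep o old' new t := by
  rw [List.cons_append, rep]
  simp [List.isPrefixOf_iff_prefix, List.prefix_append]

lemma rep_skip {o : Char} {old' : List Char} (new : List Char) {c : Char} {t : List Char}
    (h : ¬ (o :: old') <+: (c :: t)) :
    rep o old' new (c :: t) = c :: rep o old' new t := by
  rw [rep]
  simp [List.isPrefixOf_iff_prefix, h]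

lemma rep_push (o : Char) (old' new : List Char) (p : List Char)
    (H : ∀ i < p.length, pvCompat (p.drop i) (o :: old') = false) :
    ∀ z, rep o old' new (p ++ z) = p ++ rep o old' new z := by
  induction p with
  | nil => simp
  | cons q p' ih =>
    intro z
    have h0 : ¬ (o :: old') <+: ((q :: p') ++ z) :=
      not_prefix_of_not_compat (by simpa using H 0 (by simp)) z
    rw [List.cons_append, rep_skip new (by simpa using h0)]
    congr 1
    exact ih (fun i hi => by simpa using H (i+1) (by simpa using hi)) z

lemma rep_prefix_eq (o : Char) (old' new : List Char) :
    ∀ (n : Nat) (s p : List Char), s.length ≤ n →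
      (∀ i < p.length, pvCompat (p.drop i) (o :: old') = false) →
      (∀ i < p.length, pvCompat (p.drop i) new = false) →
      (p <+: rep o old' new s ↔ p <+: s) := by
  intro n
  induction n with
  | zero =>
    intro s p h _ _
    have hs : s = [] := by cases s <;> simp_all
    subst hs; rw [rep]
  | succ n ih =>
    intro s p h Hk Hv
    cases s with
    | nil => rw [rep]
    | cons c t =>
      by_cases hp : (o :: old') <+: (c :: t)
      · obtain ⟨z, hz⟩ := hp
        cases p with
        | nil => simp [List.nil_prefix]
        | cons q p' =>
          have hk0 : pvCompat (q :: p') (o :: old') = false := by simpa using Hk 0 (by simp)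
          have hv0 : pvCompat (q :: p') new = false := by simpa using Hv 0 (by simp)
          rw [← hz, rep_consume]
          constructor
          · intro hpre; exact absurd hpre (not_prefix_of_not_compat (by
              simp only [pvCompat, Bool.or_eq_false_iff] at hv0 ⊢
              exact ⟨hv0.2, hv0.1⟩) _)
          · intro hpre; exact absurd hpre (not_prefix_of_not_compat (by
              simp only [pvCompat, Bool.or_eq_false_iff] at hk0 ⊢
              exact ⟨hk0.2, hk0.1⟩) _)
      · rw [rep_skip new hp]
        cases p with
        | nil => simp [List.nil_prefix]
        | cons q p' =>
          rw [List.cons_prefix_cons, List.cons_prefix_cons]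
          have := ih t p' (by simp at h; omega)
            (fun i hi => by simpa using Hk (i+1) (by simpa using hi))
            (fun i hi => by simpa using Hv (i+1) (by simpa using hi))
          rw [this]

lemma rep_pref (o : Char) (old' new : List Char) {p : List Char} (s : List Char)
    (Hk : ∀ i < p.length, pvCompat (p.drop i) (o :: old') = false)
    (Hv : ∀ i < p.length, pvCompat (p.drop i) new = false) :
    (p <+: rep o old' new s ↔ p <+: s) :=
  rep_prefix_eq o old' new s.length s p le_rfl Hk Hv

lemma altGo_some {c : Char} {t : List Char} {pr : List Char × List Char}
    (h : pvScan pvPairs (c :: t) = some pr) :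
    altGo (c :: t) = pr.2 ++ altGo ((c :: t).drop pr.1.length) := by
  conv_lhs => rw [altGo]
  split
  · rename_i pr' h'; rw [h] at h'; cases h'; rfl
  · rename_i h'; rw [h] at h'; cases h'

lemma altGo_none {c : Char} {t : List Char} (h : pvScan pvPairs (c :: t) = none) :
    altGo (c :: t) = c :: altGo t := by
  conv_lhs => rw [altGo]
  split
  · rename_i pr' h'; rw [h] at h'; cases h'
  · rfl

lemma altGo_nil : altGo [] = [] := by rw [altGo]

lemma infix_ext {x t : List Char} (k : List Char) (h : x <:+: t) : x <:+: (k ++ t) :=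
  h.trans (List.suffix_append k t).isInfix

lemma chainDec_1 (z : List Char) :
    rep 'w' ['a','n','n','a'] ['w','a','n','t',' ','t','o'] (rep 'g' ['o','n','n','a'] ['g','o','i','n','g',' ','t','o'] (rep 'n' ['o','p','e'] ['n','o'] (rep 's' ['u','r','e'] ['c','e','r','t','a','i','n','l','y'] (rep 'o' ['k'] ['v','e','r','y',' ','w','e','l','l'] (rep 'y' ['e','a','h'] ['y','e','s'] ((['o','k'] ++ z))))))) = ['v','e','r','y',' ','w','e','l','l'] ++ (rep 'w' ['a','n','n','a'] ['w','a','n','t',' ','t','o'] (rep 'g' ['o','n','n','a'] ['g','o','i','n','g',' ','t','o'] (rep 'n' ['o','p','e'] ['n','o'] (rep 's' ['u','r','e'] ['c','e','r','t','a','i','n','l','y'] (rep 'o' ['k'] ['v','e','r','y',' ','w','e','l','l'] (rep 'y' ['e','a','h'] ['y','e','s'] (z))))))) := by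
  rw [rep_push 'y' ['e','a','h'] ['y','e','s'] ['o','k'] (by decide)]
  rw [rep_consume 'o' ['k'] ['v','e','r','y',' ','w','e','l','l']]
  rw [rep_push 's' ['u','r','e'] ['c','e','r','t','a','i','n','l','y'] ['v','e','r','y',' ','w','e','l','l'] (by decide)]
  rw [rep_push 'n' ['o','p','e'] ['n','o'] ['v','e','r','y',' ','w','e','l','l'] (by decide)]
  rw [rep_push 'g' ['o','n','n','a'] ['g','o','i','n','g',' ','t','o'] ['v','e','r','y',' ','w','e','l','l'] (by decide)]
  rw [rep_push 'w' ['a','n','n','a'] ['w','a','n','t',' ','t','o'] ['v','e','r','y',' ','w','e','l','l'] (by decide)]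

lemma chainDec_2 (z : List Char) :
    rep 'w' ['a','n','n','a'] ['w','a','n','t',' ','t','o'] (rep 'g' ['o','n','n','a'] ['g','o','i','n','g',' ','t','o'] (rep 'n' ['o','p','e'] ['n','o'] (rep 's' ['u','r','e'] ['c','e','r','t','a','i','n','l','y'] (rep 'o' ['k'] ['v','e','r','y',' ','w','e','l','l'] (rep 'y' ['e','a','h'] ['y','e','s'] ((['s','u','r','e'] ++ z))))))) = ['c','e','r','t','a','i','n','l','y'] ++ (rep 'w' ['a','n','n','a'] ['w','a','n','t',' ','t','o'] (rep 'g' ['o','n','n','a'] ['g','o','i','n','g',' ','t','o'] (rep 'n' ['o','p','e'] ['n','o'] (rep 's' ['u','r','e'] ['c','e','r','t','a','i','n','l','y'] (rep 'o' ['k'] ['v','e','r','y',' ','w','e','l','l'] (rep 'y' ['e','a','h'] ['y','e','s'] (z))))))) := by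
  rw [rep_push 'y' ['e','a','h'] ['y','e','s'] ['s','u','r','e'] (by decide)]
  rw [rep_push 'o' ['k'] ['v','e','r','y',' ','w','e','l','l'] ['s','u','r','e'] (by decide)]
  rw [rep_consume 's' ['u','r','e'] ['c','e','r','t','a','i','n','l','y']]
  rw [rep_push 'n' ['o','p','e'] ['n','o'] ['c','e','r','t','a','i','n','l','y'] (by decide)]
  rw [rep_push 'g' ['o','n','n','a'] ['g','o','i','n','g',' ','t','o'] ['c','e','r','t','a','i','n','l','y'] (by decide)]
  rw [rep_push 'w' ['a','n','n','a'] ['w','a','n','t',' ','t','o'] ['c','e','r','t','a','i','n','l','y'] (by decide)]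

lemma chainDec_3 (z : List Char) :
    rep 'w' ['a','n','n','a'] ['w','a','n','t',' ','t','o'] (rep 'g' ['o','n','n','a'] ['g','o','i','n','g',' ','t','o'] (rep 'n' ['o','p','e'] ['n','o'] (rep 's' ['u','r','e'] ['c','e','r','t','a','i','n','l','y'] (rep 'o' ['k'] ['v','e','r','y',' ','w','e','l','l'] (rep 'y' ['e','a','h'] ['y','e','s'] ((['n','o','p','e'] ++ z))))))) = ['n','o'] ++ (rep 'w' ['a','n','n','a'] ['w','a','n','t',' ','t','o'] (rep 'g' ['o','n','n','a'] ['g','o','i','n','g',' ','t','o'] (rep 'n' ['o','p','e'] ['n','o'] (rep 's' ['u','r','e'] ['c','e','r','t','a','i','n','l','y'] (rep 'o' ['k'] ['v','e','r','y',' ','w','e','l','l'] (rep 'y' ['e','a','h'] ['y','e','s'] (z))))))) := by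
  rw [rep_push 'y' ['e','a','h'] ['y','e','s'] ['n','o','p','e'] (by decide)]
  rw [rep_push 'o' ['k'] ['v','e','r','y',' ','w','e','l','l'] ['n','o','p','e'] (by decide)]
  rw [rep_push 's' ['u','r','e'] ['c','e','r','t','a','i','n','l','y'] ['n','o','p','e'] (by decide)]
  rw [rep_consume 'n' ['o','p','e'] ['n','o']]
  rw [rep_push 'g' ['o','n','n','a'] ['g','o','i','n','g',' ','t','o'] ['n','o'] (by decide)]
  rw [rep_push 'w' ['a','n','n','a'] ['w','a','n','t',' ','t','o'] ['n','o'] (by decide)]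

lemma chainDec_4 (z : List Char) :
    rep 'w' ['a','n','n','a'] ['w','a','n','t',' ','t','o'] (rep 'g' ['o','n','n','a'] ['g','o','i','n','g',' ','t','o'] (rep 'n' ['o','p','e'] ['n','o'] (rep 's' ['u','r','e'] ['c','e','r','t','a','i','n','l','y'] (rep 'o' ['k'] ['v','e','r','y',' ','w','e','l','l'] (rep 'y' ['e','a','h'] ['y','e','s'] ((['g','o','n','n','a'] ++ z))))))) = ['g','o','i','n','g',' ','t','o'] ++ (rep 'w' ['a','n','n','a'] ['w','a','n','t',' ','t','o'] (rep 'g' ['o','n','n','a'] ['g','o','i','n','g',' ','t','o'] (rep 'n' ['o','p','e'] ['n','o'] (rep 's' ['u','r','e'] ['c','e','r','t','a','i','n','l','y'] (rep 'o' ['k'] ['v','e','r','y',' ','w','e','l','l'] (rep 'y' ['e','a','h'] ['y','e','s'] (z))))))) := by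
  rw [rep_push 'y' ['e','a','h'] ['y','e','s'] ['g','o','n','n','a'] (by decide)]
  rw [rep_push 'o' ['k'] ['v','e','r','y',' ','w','e','l','l'] ['g','o','n','n','a'] (by decide)]
  rw [rep_push 's' ['u','r','e'] ['c','e','r','t','a','i','n','l','y'] ['g','o','n','n','a'] (by decide)]
  rw [rep_push 'n' ['o','p','e'] ['n','o'] ['g','o','n','n','a'] (by decide)]
  rw [rep_consume 'g' ['o','n','n','a'] ['g','o','i','n','g',' ','t','o']]
  rw [rep_push 'w' ['a','n','n','a'] ['w','a','n','t',' ','t','o'] ['g','o','i','n','g',' ','t','o'] (by decide)]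

lemma chainDec_5 (z : List Char) :
    rep 'w' ['a','n','n','a'] ['w','a','n','t',' ','t','o'] (rep 'g' ['o','n','n','a'] ['g','o','i','n','g',' ','t','o'] (rep 'n' ['o','p','e'] ['n','o'] (rep 's' ['u','r','e'] ['c','e','r','t','a','i','n','l','y'] (rep 'o' ['k'] ['v','e','r','y',' ','w','e','l','l'] (rep 'y' ['e','a','h'] ['y','e','s'] ((['w','a','n','n','a'] ++ z))))))) = ['w','a','n','t',' ','t','o'] ++ (rep 'w' ['a','n','n','a'] ['w','a','n','t',' ','t','o'] (rep 'g' ['o','n','n','a'] ['g','o','i','n','g',' ','t','o'] (rep 'n' ['o','p','e'] ['n','o'] (rep 's' ['u','r','e'] ['c','e','r','t','a','i','n','l','y'] (rep 'o' ['k'] ['v','e','r','y',' ','w','e','l','l'] (rep 'y' ['e','a','h'] ['y','e','s'] (z))))))) := by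
  rw [rep_push 'y' ['e','a','h'] ['y','e','s'] ['w','a','n','n','a'] (by decide)]
  rw [rep_push 'o' ['k'] ['v','e','r','y',' ','w','e','l','l'] ['w','a','n','n','a'] (by decide)]
  rw [rep_push 's' ['u','r','e'] ['c','e','r','t','a','i','n','l','y'] ['w','a','n','n','a'] (by decide)]
  rw [rep_push 'n' ['o','p','e'] ['n','o'] ['w','a','n','n','a'] (by decide)]
  rw [rep_push 'g' ['o','n','n','a'] ['g','o','i','n','g',' ','t','o'] ['w','a','n','n','a'] (by decide)]
  rw [rep_consume 'w' ['a','n','n','a'] ['w','a','n','t',' ','t','o']]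

lemma chainDec_0 (z : List Char) (hure : ¬ (['u','r','e'] <+: z)) :
    rep 'w' ['a','n','n','a'] ['w','a','n','t',' ','t','o'] (rep 'g' ['o','n','n','a'] ['g','o','i','n','g',' ','t','o'] (rep 'n' ['o','p','e'] ['n','o'] (rep 's' ['u','r','e'] ['c','e','r','t','a','i','n','l','y'] (rep 'o' ['k'] ['v','e','r','y',' ','w','e','l','l'] (rep 'y' ['e','a','h'] ['y','e','s'] ((['y','e','a','h'] ++ z))))))) = ['y','e','s'] ++ (rep 'w' ['a','n','n','a'] ['w','a','n','t',' ','t','o'] (rep 'g' ['o','n','n','a'] ['g','o','i','n','g',' ','t','o'] (rep 'n' ['o','p','e'] ['n','o'] (rep 's' ['u','r','e'] ['c','e','r','t','a','i','n','l','y'] (rep 'o' ['k'] ['v','e','r','y',' ','w','e','l','l'] (rep 'y' ['e','a','h'] ['y','e','s'] (z))))))) := by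
  have hure2 : ¬ (['u','r','e'] <+: rep 'o' ['k'] ['v','e','r','y',' ','w','e','l','l'] (rep 'y' ['e','a','h'] ['y','e','s'] z)) := by
    rw [rep_pref 'o' ['k'] ['v','e','r','y',' ','w','e','l','l'] (p := ['u','r','e']) (rep 'y' ['e','a','h'] ['y','e','s'] z) (by decide) (by decide),
        rep_pref 'y' ['e','a','h'] ['y','e','s'] (p := ['u','r','e']) (z) (by decide) (by decide)]
    exact hure
  rw [rep_consume 'y' ['e','a','h'] ['y','e','s']]
  rw [rep_push 'o' ['k'] ['v','e','r','y',' ','w','e','l','l'] ['y','e','s'] (by decide)]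
  rw [show (['y','e','s'] : List Char) ++ (rep 'o' ['k'] ['v','e','r','y',' ','w','e','l','l'] (rep 'y' ['e','a','h'] ['y','e','s'] z))
      = ['y','e'] ++ ('s' :: (rep 'o' ['k'] ['v','e','r','y',' ','w','e','l','l'] (rep 'y' ['e','a','h'] ['y','e','s'] z))) from rfl]
  rw [rep_push 's' ['u','r','e'] ['c','e','r','t','a','i','n','l','y'] ['y','e'] (by decide)]
  rw [rep_skip ['c','e','r','t','a','i','n','l','y'] (by
    rw [List.cons_prefix_cons]; rintro ⟨-, hx⟩; exact hure2 hx)]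
  rw [show (['y','e'] : List Char) ++ ('s' :: (rep 's' ['u','r','e'] ['c','e','r','t','a','i','n','l','y'] (rep 'o' ['k'] ['v','e','r','y',' ','w','e','l','l'] (rep 'y' ['e','a','h'] ['y','e','s'] z))))
      = ['y','e','s'] ++ (rep 's' ['u','r','e'] ['c','e','r','t','a','i','n','l','y'] (rep 'o' ['k'] ['v','e','r','y',' ','w','e','l','l'] (rep 'y' ['e','a','h'] ['y','e','s'] z))) from rfl]
  rw [rep_push 'n' ['o','p','e'] ['n','o'] ['y','e','s'] (by decide)]
  rw [rep_push 'g' ['o','n','n','a'] ['g','o','i','n','g',' ','t','o'] ['y','e','s'] (by decide)]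
  rw [rep_push 'w' ['a','n','n','a'] ['w','a','n','t',' ','t','o'] ['y','e','s'] (by decide)]

lemma chainDecCasc (z : List Char) :
    rep 'w' ['a','n','n','a'] ['w','a','n','t',' ','t','o'] (rep 'g' ['o','n','n','a'] ['g','o','i','n','g',' ','t','o'] (rep 'n' ['o','p','e'] ['n','o'] (rep 's' ['u','r','e'] ['c','e','r','t','a','i','n','l','y'] (rep 'o' ['k'] ['v','e','r','y',' ','w','e','l','l'] (rep 'y' ['e','a','h'] ['y','e','s'] ((['y','e','a','h','u','r','e'] ++ z))))))) = ['y','e','c','e','r','t','a','i','n','l','y'] ++ (rep 'w' ['a','n','n','a'] ['w','a','n','t',' ','t','o'] (rep 'g' ['o','n','n','a'] ['g','o','i','n','g',' ','t','o'] (rep 'n' ['o','p','e'] ['n','o'] (rep 's' ['u','r','e'] ['c','e','r','t','a','i','n','l','y'] (rep 'o' ['k'] ['v','e','r','y',' ','w','e','l','l'] (rep 'y' ['e','a','h'] ['y','e','s'] (z))))))) := by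
  rw [show (['y','e','a','h','u','r','e'] : List Char) ++ z = ['y','e','a','h'] ++ (['u','r','e'] ++ z) from rfl]
  rw [rep_consume 'y' ['e','a','h'] ['y','e','s']]
  rw [rep_push 'y' ['e','a','h'] ['y','e','s'] ['u','r','e'] (by decide)]
  rw [show (['y','e','s'] : List Char) ++ (['u','r','e'] ++ (rep 'y' ['e','a','h'] ['y','e','s'] z)) = ['y','e','s','u','r','e'] ++ (rep 'y' ['e','a','h'] ['y','e','s'] z) from rfl]
  rw [rep_push 'o' ['k'] ['v','e','r','y',' ','w','e','l','l'] ['y','e','s','u','r','e'] (by decide)]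
  rw [show (['y','e','s','u','r','e'] : List Char) ++ (rep 'o' ['k'] ['v','e','r','y',' ','w','e','l','l'] (rep 'y' ['e','a','h'] ['y','e','s'] z)) = ['y','e'] ++ (['s','u','r','e'] ++ (rep 'o' ['k'] ['v','e','r','y',' ','w','e','l','l'] (rep 'y' ['e','a','h'] ['y','e','s'] z))) from rfl]
  rw [rep_push 's' ['u','r','e'] ['c','e','r','t','a','i','n','l','y'] ['y','e'] (by decide)]
  rw [show (['s','u','r','e'] : List Char) ++ (rep 'o' ['k'] ['v','e','r','y',' ','w','e','l','l'] (rep 'y' ['e','a','h'] ['y','e','s'] z)) = ('s' :: ['u','r','e']) ++ (rep 'o' ['k'] ['v','e','r','y',' ','w','e','l','l'] (rep 'y' ['e','a','h'] ['y','e','s'] z)) from rfl]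
  rw [rep_consume 's' ['u','r','e'] ['c','e','r','t','a','i','n','l','y']]
  rw [show (['y','e'] : List Char) ++ (['c','e','r','t','a','i','n','l','y'] ++ (rep 's' ['u','r','e'] ['c','e','r','t','a','i','n','l','y'] (rep 'o' ['k'] ['v','e','r','y',' ','w','e','l','l'] (rep 'y' ['e','a','h'] ['y','e','s'] z)))) = ['y','e','c','e','r','t','a','i','n','l','y'] ++ (rep 's' ['u','r','e'] ['c','e','r','t','a','i','n','l','y'] (rep 'o' ['k'] ['v','e','r','y',' ','w','e','l','l'] (rep 'y' ['e','a','h'] ['y','e','s'] z))) from rfl]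
  rw [rep_push 'n' ['o','p','e'] ['n','o'] ['y','e','c','e','r','t','a','i','n','l','y'] (by decide)]
  rw [rep_push 'g' ['o','n','n','a'] ['g','o','i','n','g',' ','t','o'] ['y','e','c','e','r','t','a','i','n','l','y'] (by decide)]
  rw [rep_push 'w' ['a','n','n','a'] ['w','a','n','t',' ','t','o'] ['y','e','c','e','r','t','a','i','n','l','y'] (by decide)]

lemma chainDecNone (c : Char) (t : List Char)
    (h1 : ¬ (['y','e','a','h'] <+: (c :: t)))
    (h2 : ¬ (['o','k'] <+: (c :: t)))
    (h3 : ¬ (['s','u','r','e'] <+: (c :: t)))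
    (h4 : ¬ (['n','o','p','e'] <+: (c :: t)))
    (h5 : ¬ (['g','o','n','n','a'] <+: (c :: t)))
    (h6 : ¬ (['w','a','n','n','a'] <+: (c :: t)))
    : rep 'w' ['a','n','n','a'] ['w','a','n','t',' ','t','o'] (rep 'g' ['o','n','n','a'] ['g','o','i','n','g',' ','t','o'] (rep 'n' ['o','p','e'] ['n','o'] (rep 's' ['u','r','e'] ['c','e','r','t','a','i','n','l','y'] (rep 'o' ['k'] ['v','e','r','y',' ','w','e','l','l'] (rep 'y' ['e','a','h'] ['y','e','s'] ((c :: t))))))) = c :: (rep 'w' ['a','n','n','a'] ['w','a','n','t',' ','t','o'] (rep 'g' ['o','n','n','a'] ['g','o','i','n','g',' ','t','o'] (rep 'n' ['o','p','e'] ['n','o'] (rep 's' ['u','r','e'] ['c','e','r','t','a','i','n','l','y'] (rep 'o' ['k'] ['v','e','r','y',' ','w','e','l','l'] (rep 'y' ['e','a','h'] ['y','e','s'] (t))))))) := by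
  rw [rep_skip ['y','e','s'] h1]
  rw [rep_skip ['v','e','r','y',' ','w','e','l','l'] (by
    rw [List.cons_prefix_cons]; rintro ⟨hc, hk⟩
    exact h2 (by rw [List.cons_prefix_cons]; exact ⟨hc, (rep_pref 'y' ['e','a','h'] ['y','e','s'] (p := ['k']) (t) (by decide) (by decide)).mp (hk)⟩))]
  rw [rep_skip ['c','e','r','t','a','i','n','l','y'] (by
    rw [List.cons_prefix_cons]; rintro ⟨hc, hk⟩
    exact h3 (by rw [List.cons_prefix_cons]; exact ⟨hc, (rep_pref 'y' ['e','a','h'] ['y','e','s'] (p := ['u','r','e']) (t) (by decide) (by decide)).mp ((rep_pref 'o' ['k'] ['v','e','r','y',' ','w','e','l','l'] (p := ['u','r','e']) (rep 'y' ['e','a','h'] ['y','e','s'] (t)) (by decide) (by decide)).mp (hk))⟩))]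
  rw [rep_skip ['n','o'] (by
    rw [List.cons_prefix_cons]; rintro ⟨hc, hk⟩
    exact h4 (by rw [List.cons_prefix_cons]; exact ⟨hc, (rep_pref 'y' ['e','a','h'] ['y','e','s'] (p := ['o','p','e']) (t) (by decide) (by decide)).mp ((rep_pref 'o' ['k'] ['v','e','r','y',' ','w','e','l','l'] (p := ['o','p','e']) (rep 'y' ['e','a','h'] ['y','e','s'] (t)) (by decide) (by decide)).mp ((rep_pref 's' ['u','r','e'] ['c','e','r','t','a','i','n','l','y'] (p := ['o','p','e']) (rep 'o' ['k'] ['v','e','r','y',' ','w','e','l','l'] (rep 'y' ['e','a','h'] ['y','e','s'] (t))) (by decide) (by decide)).mp (hk)))⟩))]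
  rw [rep_skip ['g','o','i','n','g',' ','t','o'] (by
    rw [List.cons_prefix_cons]; rintro ⟨hc, hk⟩
    exact h5 (by rw [List.cons_prefix_cons]; exact ⟨hc, (rep_pref 'y' ['e','a','h'] ['y','e','s'] (p := ['o','n','n','a']) (t) (by decide) (by decide)).mp ((rep_pref 'o' ['k'] ['v','e','r','y',' ','w','e','l','l'] (p := ['o','n','n','a']) (rep 'y' ['e','a','h'] ['y','e','s'] (t)) (by decide) (by decide)).mp ((rep_pref 's' ['u','r','e'] ['c','e','r','t','a','i','n','l','y'] (p := ['o','n','n','a']) (rep 'o' ['k'] ['v','e','r','y',' ','w','e','l','l'] (rep 'y' ['e','a','h'] ['y','e','s'] (t))) (by decide) (by decide)).mp ((rep_pref 'n' ['o','p','e'] ['n','o'] (p := ['o','n','n','a']) (rep 's' ['u','r','e'] ['c','e','r','t','a','i','n','l','y'] (rep 'o' ['k'] ['v','e','r','y',' ','w','e','l','l'] (rep 'y' ['e','a','h'] ['y','e','s'] (t)))) (by decide) (by decide)).mp (hk))))⟩))]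
  rw [rep_skip ['w','a','n','t',' ','t','o'] (by
    rw [List.cons_prefix_cons]; rintro ⟨hc, hk⟩
    exact h6 (by rw [List.cons_prefix_cons]; exact ⟨hc, (rep_pref 'y' ['e','a','h'] ['y','e','s'] (p := ['a','n','n','a']) (t) (by decide) (by decide)).mp ((rep_pref 'o' ['k'] ['v','e','r','y',' ','w','e','l','l'] (p := ['a','n','n','a']) (rep 'y' ['e','a','h'] ['y','e','s'] (t)) (by decide) (by decide)).mp ((rep_pref 's' ['u','r','e'] ['c','e','r','t','a','i','n','l','y'] (p := ['a','n','n','a']) (rep 'o' ['k'] ['v','e','r','y',' ','w','e','l','l'] (rep 'y' ['e','a','h'] ['y','e','s'] (t))) (by decide) (by decide)).mp ((rep_pref 'n' ['o','p','e'] ['n','o'] (p := ['a','n','n','a']) (rep 's' ['u','r','e'] ['c','e','r','t','a','i','n','l','y'] (rep 'o' ['k'] ['v','e','r','y',' ','w','e','l','l'] (rep 'y' ['e','a','h'] ['y','e','s'] (t)))) (by decide) (by decide)).mp ((rep_pref 'g' ['o','n','n','a'] ['g','o','i','n','g',' ','t','o'] (p := ['a','n','n','a']) (rep 'n' ['o','p','e']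 ['n','o'] (rep 's' ['u','r','e'] ['c','e','r','t','a','i','n','l','y'] (rep 'o' ['k'] ['v','e','r','y',' ','w','e','l','l'] (rep 'y' ['e','a','h'] ['y','e','s'] (t))))) (by decide) (by decide)).mp (hk)))))⟩))]

lemma altDec_0 (z : List Char) : altGo (['y','e','a','h'] ++ z) = ['y','e','s'] ++ altGo z := by
  rw [show (['y','e','a','h'] ++ z : List Char) = 'y'::'e'::'a'::'h'::z from rfl]
  rw [altGo_some (pr := ("yeah".toList, "yes".toList)) (by simp [pvScan, pvPairs, List.isPrefixOf])]
  simp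

lemma altDec_1 (z : List Char) : altGo (['o','k'] ++ z) = ['v','e','r','y',' ','w','e','l','l'] ++ altGo z := by
  rw [show (['o','k'] ++ z : List Char) = 'o'::'k'::z from rfl]
  rw [altGo_some (pr := ("ok".toList, "very well".toList)) (by simp [pvScan, pvPairs, List.isPrefixOf])]
  simp

lemma altDec_2 (z : List Char) : altGo (['s','u','r','e'] ++ z) = ['c','e','r','t','a','i','n','l','y'] ++ altGo z := by
  rw [show (['s','u','r','e'] ++ z : List Char) = 's'::'u'::'r'::'e'::z from rfl]
  rw [altGo_some (pr := ("sure".toList, "certainly".toList)) (by simp [pvScan, pvPairs, List.isPrefixOf])]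
  simp

lemma altDec_3 (z : List Char) : altGo (['n','o','p','e'] ++ z) = ['n','o'] ++ altGo z := by
  rw [show (['n','o','p','e'] ++ z : List Char) = 'n'::'o'::'p'::'e'::z from rfl]
  rw [altGo_some (pr := ("nope".toList, "no".toList)) (by simp [pvScan, pvPairs, List.isPrefixOf])]
  simp

lemma altDec_4 (z : List Char) : altGo (['g','o','n','n','a'] ++ z) = ['g','o','i','n','g',' ','t','o'] ++ altGo z := by
  rw [show (['g','o','n','n','a'] ++ z : List Char) = 'g'::'o'::'n'::'n'::'a'::z from rfl]
  rw [altGo_some (pr := ("gonna".toList, "going to".toList)) (by simp [pvScan, pvPairs, List.isPrefixOf])]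
  simp

lemma altDec_5 (z : List Char) : altGo (['w','a','n','n','a'] ++ z) = ['w','a','n','t',' ','t','o'] ++ altGo z := by
  rw [show (['w','a','n','n','a'] ++ z : List Char) = 'w'::'a'::'n'::'n'::'a'::z from rfl]
  rw [altGo_some (pr := ("wanna".toList, "want to".toList)) (by simp [pvScan, pvPairs, List.isPrefixOf])]
  simp

lemma altDecNone (c : Char) (t : List Char)
    (h1 : ¬ (['y','e','a','h'] <+: (c :: t)))
    (h2 : ¬ (['o','k'] <+: (c :: t)))
    (h3 : ¬ (['s','u','r','e'] <+: (c :: t)))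
    (h4 : ¬ (['n','o','p','e'] <+: (c :: t)))
    (h5 : ¬ (['g','o','n','n','a'] <+: (c :: t)))
    (h6 : ¬ (['w','a','n','n','a'] <+: (c :: t)))
    : altGo (c :: t) = c :: altGo t := by
  rw [altGo_none (by simp [pvScan, pvPairs, List.isPrefixOf_iff_prefix, h1, h2, h3, h4, h5, h6])]

lemma altGoUre (z : List Char) : altGo (['u','r','e'] ++ z) = 'u' :: 'r' :: 'e' :: altGo z := by
  rw [show (['u','r','e'] : List Char) ++ z = 'u'::'r'::'e'::z from rfl]
  rw [altGo_none (by simp [pvScan, pvPairs, List.isPrefixOf])]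
  rw [altGo_none (by simp [pvScan, pvPairs, List.isPrefixOf])]
  rw [altGo_none (by simp [pvScan, pvPairs, List.isPrefixOf])]

lemma infix_peel {x : List Char} {c : Char} {t : List Char} (h : x <:+: c :: t)
    (hp : ¬ x <+: c :: t) : x <:+: t := (List.infix_cons_iff.mp h).resolve_left hp

lemma yeahure_not_prefix {a : Char} (ha : a ≠ 'y') (r : List Char) :
    ¬ ("yeahure".toList <+: a :: r) := by
  rw [show "yeahure".toList = 'y' :: ['e','a','h','u','r','e'] from rfl, List.cons_prefix_cons]
  rintro ⟨h1, -⟩; exact ha h1.symm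

lemma pvMain : ∀ (n : Nat) (s : List Char), s.length ≤ n → ¬ ("yeahure".toList <:+: s) →
    rep 'w' ['a','n','n','a'] ['w','a','n','t',' ','t','o'] (rep 'g' ['o','n','n','a'] ['g','o','i','n','g',' ','t','o'] (rep 'n' ['o','p','e'] ['n','o'] (rep 's' ['u','r','e'] ['c','e','r','t','a','i','n','l','y'] (rep 'o' ['k'] ['v','e','r','y',' ','w','e','l','l'] (rep 'y' ['e','a','h'] ['y','e','s'] (s)))))) = altGo s := by
  intro n
  induction n with
  | zero =>
    intro s h _
    have hs : s = [] := by cases s <;> simp_all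
    subst hs; rw [altGo_nil]; simp [rep]
  | succ n ih =>
    intro s h hD
    cases s with
    | nil => rw [altGo_nil]; simp [rep]
    | cons c t =>
      by_cases h1 : ['y','e','a','h'] <+: (c :: t)
      · obtain ⟨z, hz⟩ := h1; rw [← hz] at h hD ⊢
        have hure : ¬ (['u','r','e'] <+: z) := fun hu => hD (by
          obtain ⟨w, hw⟩ := hu
          exact ⟨[], w, by rw [show "yeahure".toList = ['y','e','a','h','u','r','e'] from rfl]; simp [← hw]⟩)
        rw [chainDec_0 z hure, altDec_0 z, ih z (by simp at h; omega) (fun hx => hD (infix_ext _ hx))]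
      · by_cases h2 : ['o','k'] <+: (c :: t)
        · obtain ⟨z, hz⟩ := h2; rw [← hz] at h hD ⊢
          rw [chainDec_1 z, altDec_1 z, ih z (by simp at h; omega) (fun hx => hD (infix_ext _ hx))]
        · by_cases h3 : ['s','u','r','e'] <+: (c :: t)
          · obtain ⟨z, hz⟩ := h3; rw [← hz] at h hD ⊢
            rw [chainDec_2 z, altDec_2 z, ih z (by simp at h; omega) (fun hx => hD (infix_ext _ hx))]
          · by_cases h4 : ['n','o','p','e'] <+: (c :: t)
            · obtain ⟨z, hz⟩ := h4; rw [← hz] at h hD ⊢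
              rw [chainDec_3 z, altDec_3 z, ih z (by simp at h; omega) (fun hx => hD (infix_ext _ hx))]
            · by_cases h5 : ['g','o','n','n','a'] <+: (c :: t)
              · obtain ⟨z, hz⟩ := h5; rw [← hz] at h hD ⊢
                rw [chainDec_4 z, altDec_4 z, ih z (by simp at h; omega) (fun hx => hD (infix_ext _ hx))]
              · by_cases h6 : ['w','a','n','n','a'] <+: (c :: t)
                · obtain ⟨z, hz⟩ := h6; rw [← hz] at h hD ⊢
                  rw [chainDec_5 z, altDec_5 z, ih z (by simp at h; omega) (fun hx => hD (infix_ext _ hx))]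
                · rw [chainDecNone c t h1 h2 h3 h4 h5 h6, altDecNone c t h1 h2 h3 h4 h5 h6,
                      ih t (by simp at h; omega) (fun hx => hD (infix_ext [c] hx))]

lemma pvLen : ∀ (n : Nat) (s : List Char), s.length ≤ n →
    (altGo s).length ≤ (rep 'w' ['a','n','n','a'] ['w','a','n','t',' ','t','o'] (rep 'g' ['o','n','n','a'] ['g','o','i','n','g',' ','t','o'] (rep 'n' ['o','p','e'] ['n','o'] (rep 's' ['u','r','e'] ['c','e','r','t','a','i','n','l','y'] (rep 'o' ['k'] ['v','e','r','y',' ','w','e','l','l'] (rep 'y' ['e','a','h'] ['y','e','s'] (s))))))).length ∧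
    (("yeahure".toList <:+: s) → (altGo s).length < (rep 'w' ['a','n','n','a'] ['w','a','n','t',' ','t','o'] (rep 'g' ['o','n','n','a'] ['g','o','i','n','g',' ','t','o'] (rep 'n' ['o','p','e'] ['n','o'] (rep 's' ['u','r','e'] ['c','e','r','t','a','i','n','l','y'] (rep 'o' ['k'] ['v','e','r','y',' ','w','e','l','l'] (rep 'y' ['e','a','h'] ['y','e','s'] (s))))))).length) := by
  intro n
  induction n with
  | zero =>
    intro s h
    have hs : s = [] := by cases s <;> simp_all
    subst hs
    refine ⟨by rw [altGo_nil]; simp [rep], fun hx => absurd (List.eq_nil_of_infix_nil hx) (by decide)⟩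
  | succ n ih =>
    intro s h
    cases s with
    | nil => exact ⟨by rw [altGo_nil]; simp [rep], fun hx => absurd (List.eq_nil_of_infix_nil hx) (by decide)⟩
    | cons c t =>
      by_cases hcas : "yeahure".toList <+: (c :: t)
      · obtain ⟨z, hz⟩ := hcas
        rw [show "yeahure".toList = ['y','e','a','h','u','r','e'] from rfl] at hz
        rw [← hz] at h ⊢
        have hlen : z.length ≤ n := by simp at h; omega
        rw [chainDecCasc z]
        rw [show (['y','e','a','h','u','r','e'] : List Char) ++ z = ['y','e','a','h'] ++ (['u','r','e'] ++ z) from rfl,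
            altDec_0, altGoUre]
        have h1 := (ih z hlen).1
        refine ⟨by simp only [List.length_append, List.length_cons]; omega,
                fun _ => by simp only [List.length_append, List.length_cons]; omega⟩
      · by_cases h1 : ['y','e','a','h'] <+: (c :: t)
        · obtain ⟨z, hz⟩ := h1; rw [← hz] at h hcas ⊢
          have hlen : z.length ≤ n := by simp at h; omega
          have hure : ¬ (['u','r','e'] <+: z) := fun hu => hcas (by
            obtain ⟨w, hw⟩ := hu
            exact ⟨w, by rw [show "yeahure".toList = ['y','e','a','h','u','r','e'] from rfl]; simp [← hw]⟩)
          rw [chainDec_0 z hure, altDec_0 z]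
          refine ⟨by simp only [List.length_append]; have := (ih z hlen).1; omega, fun hinf => ?_⟩
          have p1 : "yeahure".toList <:+: ('e'::'a'::'h'::z) := infix_peel hinf hcas
          have p2 : "yeahure".toList <:+: ('a'::'h'::z) := infix_peel p1 (yeahure_not_prefix (by decide) _)
          have p3 : "yeahure".toList <:+: ('h'::z) := infix_peel p2 (yeahure_not_prefix (by decide) _)
          have p4 : "yeahure".toList <:+: z := infix_peel p3 (yeahure_not_prefix (by decide) _)
          have := (ih z hlen).2 p4
          simp only [List.length_append]; omega
        · by_cases h2 : ['o','k'] <+: (c :: t)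
          · obtain ⟨z, hz⟩ := h2; rw [← hz] at h ⊢
            have hlen : z.length ≤ n := by simp at h; omega
            rw [chainDec_1 z, altDec_1 z]
            refine ⟨by simp only [List.length_append]; have := (ih z hlen).1; omega, fun hinf => ?_⟩
            have q1 : "yeahure".toList <:+: ('k'::z) := infix_peel hinf (yeahure_not_prefix (by decide) _)
            have q2 : "yeahure".toList <:+: (z) := infix_peel q1 (yeahure_not_prefix (by decide) _)
            have := (ih z hlen).2 q2
            simp only [List.length_append]; omega
          · by_cases h3 : ['s','u','r','e'] <+: (c :: t)
            · obtain ⟨z, hz⟩ := h3; rw [← hz] at h ⊢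
              have hlen : z.length ≤ n := by simp at h; omega
              rw [chainDec_2 z, altDec_2 z]
              refine ⟨by simp only [List.length_append]; have := (ih z hlen).1; omega, fun hinf => ?_⟩
              have q1 : "yeahure".toList <:+: ('u'::'r'::'e'::z) := infix_peel hinf (yeahure_not_prefix (by decide) _)
              have q2 : "yeahure".toList <:+: ('r'::'e'::z) := infix_peel q1 (yeahure_not_prefix (by decide) _)
              have q3 : "yeahure".toList <:+: ('e'::z) := infix_peel q2 (yeahure_not_prefix (by decide) _)
              have q4 : "yeahure".toList <:+: (z) := infix_peel q3 (yeahure_not_prefix (by decide) _)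
              have := (ih z hlen).2 q4
              simp only [List.length_append]; omega
            · by_cases h4 : ['n','o','p','e'] <+: (c :: t)
              · obtain ⟨z, hz⟩ := h4; rw [← hz] at h ⊢
                have hlen : z.length ≤ n := by simp at h; omega
                rw [chainDec_3 z, altDec_3 z]
                refine ⟨by simp only [List.length_append]; have := (ih z hlen).1; omega, fun hinf => ?_⟩
                have q1 : "yeahure".toList <:+: ('o'::'p'::'e'::z) := infix_peel hinf (yeahure_not_prefix (by decide) _)
                have q2 : "yeahure".toList <:+: ('p'::'e'::z) := infix_peel q1 (yeahure_not_prefix (by decide) _)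
                have q3 : "yeahure".toList <:+: ('e'::z) := infix_peel q2 (yeahure_not_prefix (by decide) _)
                have q4 : "yeahure".toList <:+: (z) := infix_peel q3 (yeahure_not_prefix (by decide) _)
                have := (ih z hlen).2 q4
                simp only [List.length_append]; omega
              · by_cases h5 : ['g','o','n','n','a'] <+: (c :: t)
                · obtain ⟨z, hz⟩ := h5; rw [← hz] at h ⊢
                  have hlen : z.length ≤ n := by simp at h; omega
                  rw [chainDec_4 z, altDec_4 z]
                  refine ⟨by simp only [List.length_append]; have := (ih z hlen).1; omega, fun hinf => ?_⟩
                  have q1 : "yeahure".toList <:+: ('o'::'n'::'n'::'a'::z) := infix_peel hinf (yeahure_not_prefix (by decide) _)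
                  have q2 : "yeahure".toList <:+: ('n'::'n'::'a'::z) := infix_peel q1 (yeahure_not_prefix (by decide) _)
                  have q3 : "yeahure".toList <:+: ('n'::'a'::z) := infix_peel q2 (yeahure_not_prefix (by decide) _)
                  have q4 : "yeahure".toList <:+: ('a'::z) := infix_peel q3 (yeahure_not_prefix (by decide) _)
                  have q5 : "yeahure".toList <:+: (z) := infix_peel q4 (yeahure_not_prefix (by decide) _)
                  have := (ih z hlen).2 q5
                  simp only [List.length_append]; omega
                · by_cases h6 : ['w','a','n','n','a'] <+: (c :: t)
                  · obtain ⟨z, hz⟩ := h6; rw [← hz] at h ⊢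
                    have hlen : z.length ≤ n := by simp at h; omega
                    rw [chainDec_5 z, altDec_5 z]
                    refine ⟨by simp only [List.length_append]; have := (ih z hlen).1; omega, fun hinf => ?_⟩
                    have q1 : "yeahure".toList <:+: ('a'::'n'::'n'::'a'::z) := infix_peel hinf (yeahure_not_prefix (by decide) _)
                    have q2 : "yeahure".toList <:+: ('n'::'n'::'a'::z) := infix_peel q1 (yeahure_not_prefix (by decide) _)
                    have q3 : "yeahure".toList <:+: ('n'::'a'::z) := infix_peel q2 (yeahure_not_prefix (by decide) _)
                    have q4 : "yeahure".toList <:+: ('a'::z) := infix_peel q3 (yeahure_not_prefix (by decide) _)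
                    have q5 : "yeahure".toList <:+: (z) := infix_peel q4 (yeahure_not_prefix (by decide) _)
                    have := (ih z hlen).2 q5
                    simp only [List.length_append]; omega
                  · rw [chainDecNone c t h1 h2 h3 h4 h5 h6, altDecNone c t h1 h2 h3 h4 h5 h6]
                    have hlen : t.length ≤ n := by simp at h; omega
                    refine ⟨by have := (ih t hlen).1; simp only [List.length_cons]; omega, fun hinf => ?_⟩
                    have hp : ¬ ("yeahure".toList <+: (c :: t)) := fun hx => h1 (List.IsPrefix.trans (by decide) hx)
                    have := (ih t hlen).2 (infix_peel hinf hp)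
                    simp only [List.length_cons]; omega

lemma pvA_toList (response : String) :
    (formalize_response_py response).toList = rep 'w' ['a','n','n','a'] ['w','a','n','t',' ','t','o'] (rep 'g' ['o','n','n','a'] ['g','o','i','n','g',' ','t','o'] (rep 'n' ['o','p','e'] ['n','o'] (rep 's' ['u','r','e'] ['c','e','r','t','a','i','n','l','y'] (rep 'o' ['k'] ['v','e','r','y',' ','w','e','l','l'] (rep 'y' ['e','a','h'] ['y','e','s'] response.toList))))) := by
  simp only [formalize_response_py, PySem.Str.toList_replace]
  rw [show "yeah".toList = 'y' :: ['e','a','h'] from rfl, show "yes".toList = (['y','e','s'] : List Char) from rfl,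
      show "ok".toList = 'o' :: ['k'] from rfl, show "very well".toList = (['v','e','r','y',' ','w','e','l','l'] : List Char) from rfl,
      show "sure".toList = 's' :: ['u','r','e'] from rfl, show "certainly".toList = (['c','e','r','t','a','i','n','l','y'] : List Char) from rfl,
      show "nope".toList = 'n' :: ['o','p','e'] from rfl, show "no".toList = (['n','o'] : List Char) from rfl,
      show "gonna".toList = 'g' :: ['o','n','n','a'] from rfl, show "going to".toList = (['g','o','i','n','g',' ','t','o'] : List Char) from rfl,
      show "wanna".toList = 'w' :: ['a','n','n','a'] from rfl, show "want to".toList = (['w','a','n','t',' ','t','o'] : List Char) from rfl]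
  rw [replace_eq_rep, replace_eq_rep, replace_eq_rep, replace_eq_rep, replace_eq_rep, replace_eq_rep]

lemma pvAltB_yeahure : formalize_response_py_alt "yeahure" = "yesure" := by
  have h : altGo "yeahure".toList = "yesure".toList := by simp [altGo, pvScan, pvPairs]
  show String.ofList (altGo "yeahure".toList) = "yesure"
  rw [h, String.ofList_toList]

-- ===== VERDICT (by name: the statement is the Claim_ definition above) =====
theorem formalize_response_py_spec : Claim_unchanged_formalize_response_py := by
  intro response _ hnD
  have hinf : ¬ ("yeahure".toList <:+: response.toList) := by
    rw [← PySem.Chars.isIn_eq_false_iff]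
    have hb : PySem.Str.isIn "yeahure" response = false :=
      Bool.eq_false_iff.mpr (fun hx => hnD hx)
    rwa [PySem.Str.isIn_eq] at hb
  have h := pvMain (response.toList.length) response.toList le_rfl hinf
  have : (formalize_response_py response).toList = altGo response.toList := by
    rw [pvA_toList]; exact h
  calc formalize_response_py response
      = String.ofList (formalize_response_py response).toList := (String.ofList_toList).symm
    _ = String.ofList (altGo response.toList) := by rw [this]
    _ = formalize_response_py_alt response := rfl

theorem formalize_response_py_changed : Claim_changed_formalize_response_py := by
  unfold Claim_changed_formalize_response_py
  refine ⟨by decide, by decide, by decide, pvAltB_yeahure, by decide⟩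

theorem formalize_response_py_tight : Claim_exact_formalize_response_py := by
  intro response _ hD heq
  have hinf : "yeahure".toList <:+: response.toList := by
    rw [← PySem.Chars.isIn_iff_infix]
    simp only [D_formalize_response_py, PySem.Str.isIn_eq] at hD
    exact hD
  have hlen := (pvLen response.toList.length response.toList le_rfl).2 hinf
  have hAB : (formalize_response_py response).toList = (formalize_response_py_alt response).toList := by
    rw [heq]
  rw [pvA_toList] at hAB
  have hB : (formalize_response_py_alt response).toList = altGo response.toList :=
    String.toList_ofList
  rw [hB] at hAB
  rw [hAB] at hlen
  exact lt_irrefl _ hlen
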